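-- pv_equiv track=rewrite | github.com/Shivam-baghel/Python_Scaler | 3rd.py | ques
-- ===== SOURCE A (Python) =====
-- def ques(arr:list,k):
--     r = len(arr)
--     if r == 1:
--         if arr[0]==1:
--             return 1
--         else:
--             return 0
--
--     l = r-(k-1)-1
--     c=0
--     ans=0
--     for i in range(l,r):
--         if arr[i]==1:
--             c = c+1
--
--     for j in range(c,0,-1):
--         ans = ans+j
--
--     for k in range(l):
--         if arr[k]==1:
--             ans = ans+ 1
--
--     return ans
-- ===== SOURCE B (Python) =====
-- def ques(arr: list, k):
--     n = len(arr)
--     if n == 1: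
--         return 1 if arr[0] == 1 else 0
--     l = n - k
--     total = 0
--     c = 0
--     for idx, v in enumerate(arr):
--         if v == 1:
--             total += 1
--             if idx >= l:
--                 c += 1
--     return (total - c) + c * (c + 1) // 2
-- ===== Notes on version B (the rewrite author's own statement) =====
-- stated objective: simpler
-- what changed: B makes one enumerate pass over the list accumulating the total number of ones and the window count, then returns the closed-form triangular number plus prefix count, replacing A's three index-range loops (window scan, descending accumulation, prefix scan).
-- intended difference: When k > len(arr) (and len(arr) != 1) and the last k-len(arr) positions contain a 1, A's window loop indexes arr with negative indices that wrap around and count those trailing ones twice, returning an inflated triangular sum; B clamps the window to the whole array and returns the intended count, e.g. A([1,0,1],4)=6 while B returns 3. — e.g. on ques([1, 0, 1], 4): A returns 6, B returns 3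
import Mathlib
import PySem

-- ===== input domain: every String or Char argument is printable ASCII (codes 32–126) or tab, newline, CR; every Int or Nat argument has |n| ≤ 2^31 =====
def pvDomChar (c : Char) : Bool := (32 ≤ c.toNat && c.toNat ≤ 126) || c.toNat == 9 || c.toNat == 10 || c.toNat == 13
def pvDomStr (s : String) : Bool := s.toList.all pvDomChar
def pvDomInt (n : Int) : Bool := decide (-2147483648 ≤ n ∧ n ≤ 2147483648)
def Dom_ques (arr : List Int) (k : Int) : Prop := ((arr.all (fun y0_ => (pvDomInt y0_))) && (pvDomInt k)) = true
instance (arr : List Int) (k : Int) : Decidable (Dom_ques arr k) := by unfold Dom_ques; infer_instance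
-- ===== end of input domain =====

-- B: one enumerate pass accumulating total ones and window ones, then the closed-form
-- triangular number plus prefix count, instead of A's three index loops.

-- ===== PORT A =====
def ques (arr : List Int) (k : Int) : Int :=
  let r : Int := arr.length
  if r = 1 then
    if PySem.List.pyGetD arr 0 0 = 1 then 1 else 0
  else
    let l := r - (k - 1) - 1
    let c := (PySem.List.pyRange l r 1).foldl
      (fun c i => if PySem.List.pyGetD arr i 0 = 1 then c + 1 else c) 0
    let ans := (PySem.List.pyRange c 0 (-1)).foldl (fun ans j => ans + j) 0
    (PySem.List.pyRange 0 l 1).foldl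
      (fun ans j => if PySem.List.pyGetD arr j 0 = 1 then ans + 1 else ans) ans

-- ===== PORT B =====
def ques_alt (arr : List Int) (k : Int) : Int :=
  let n : Int := arr.length
  if n = 1 then
    if PySem.List.pyGetD arr 0 0 = 1 then 1 else 0
  else
    let l := n - k
    let tc := (PySem.List.enumerate arr).foldl
      (fun (s : Int × Int) p =>
        if p.2 = 1 then (s.1 + 1, if l ≤ p.1 then s.2 + 1 else s.2) else s)
      ((0 : Int), (0 : Int))
    (tc.1 - tc.2) + PySem.Int.floordiv (tc.2 * (tc.2 + 1)) 2

-- ===== PRECONDITION & SPEC =====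
-- Pre_ques is exactly where Python A returns: a singleton list (the r==1 branch ignores k),
-- or 0 ≤ k ≤ 2*len(arr); outside it A raises IndexError (k < 0 makes the prefix loop
-- overrun, k > 2*len makes arr[l] underrun even with negative-index wraparound).
def Pre_ques (arr : List Int) (k : Int) : Prop :=
  arr.length = 1 ∨ (0 ≤ k ∧ k ≤ 2 * (arr.length : Int))
instance (arr : List Int) (k : Int) : Decidable (Pre_ques arr k) := by
  unfold Pre_ques; infer_instance
def pvWitness_ques : List Int × Int := ([1, 0, 1, 2], 2)

-- When k > len(arr) (and len(arr) ≠ 1) and the last k-len(arr) positions contain a 1,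
-- A's window loop wraps negative indices around and counts those trailing ones twice,
-- returning an inflated triangular sum; B clamps the window to the whole array, the intended count.
def D_ques (arr : List Int) (k : Int) : Prop :=
  arr.length ≠ 1 ∧ (arr.length : Int) < k ∧
    (1 : Int) ∈ arr.drop (arr.length - (k - (arr.length : Int)).toNat)
instance (arr : List Int) (k : Int) : Decidable (D_ques arr k) := by
  unfold D_ques; infer_instance

def Spec_ques (arr : List Int) (k : Int) (out : Int) : Prop :=
  ¬ D_ques arr k → out = ques_alt arr k
instance (arr : List Int) (k : Int) (out : Int) : Decidable (Spec_ques arr k out) := by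
  unfold Spec_ques; infer_instance

def pvDiffWitness_ques : List Int × Int := ([1, 0, 1], 4)
def pvDiffWitnessOut_ques : Int × Int := (6, 3)

-- ===== CLAIM (what is proved, stated in full; the proofs are below) =====
def Claim_unchanged_ques : Prop := ∀ (arr : List Int) (k : Int),
  Dom_ques arr k → Pre_ques arr k → Spec_ques arr k (ques arr k)
def Claim_changed_ques : Prop :=
  Dom_ques (pvDiffWitness_ques.1) (pvDiffWitness_ques.2) ∧
  Pre_ques (pvDiffWitness_ques.1) (pvDiffWitness_ques.2) ∧
  D_ques (pvDiffWitness_ques.1) (pvDiffWitness_ques.2) ∧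
  ques (pvDiffWitness_ques.1) (pvDiffWitness_ques.2) = pvDiffWitnessOut_ques.1 ∧
  ques_alt (pvDiffWitness_ques.1) (pvDiffWitness_ques.2) = pvDiffWitnessOut_ques.2 ∧
  pvDiffWitnessOut_ques.1 ≠ pvDiffWitnessOut_ques.2
def Claim_exact_ques : Prop := ∀ (arr : List Int) (k : Int),
  Dom_ques arr k → Pre_ques arr k → D_ques arr k → ques arr k ≠ ques_alt arr k

-- ===== LEMMAS AND PROOFS =====

-- number of ones, as a Nat
def cntOnes (xs : List Int) : Nat := xs.countP (fun v => decide (v = 1))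

-- sum of the countdown range(n, 0, -1) is the triangular number
theorem tri_sum (n : Nat) :
    (PySem.List.pyRange (n : Int) 0 (-1)).sum
      = PySem.Int.floordiv ((n : Int) * ((n : Int) + 1)) 2 := by
  rw [PySem.Int.floordiv_eq_ediv_of_pos (by norm_num)]
  induction n with
  | zero => simp [PySem.List.pyRange_neg_one_eq_nil]
  | succ m ih =>
    push_cast
    rw [PySem.List.pyRange_neg_one_cons (by positivity), List.sum_cons]
    rw [show (m:Int) + 1 - 1 = (m:Int) by ring, ih]
    have hexp : ((m:Int)+1)*((m:Int)+1+1) = (m:Int)*((m:Int)+1) + 2*((m:Int)+1) := by ring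
    generalize (m:Int)*((m:Int)+1) = t at *
    omega

theorem tri_cast (m : Nat) :
    PySem.Int.floordiv ((m : Int) * ((m : Int) + 1)) 2 = ((m * (m + 1) / 2 : Nat) : Int) := by
  have h : ((m : Int) * ((m : Int) + 1)) = ((m * (m + 1) : Nat) : Int) := by push_cast; ring
  rw [h]
  exact_mod_cast PySem.Int.floordiv_natCast (m * (m + 1)) 2

theorem triNat_lt {a b : Nat} (h : a < b) : a * (a + 1) / 2 < b * (b + 1) / 2 := by
  obtain ⟨x, hx⟩ := (Nat.even_mul_succ_self a)
  obtain ⟨y, hy⟩ := (Nat.even_mul_succ_self b)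
  have hab : a * (a + 1) < b * (b + 1) :=
    Nat.mul_lt_mul_of_lt_of_le h (by omega) (by omega)
  omega

-- B's fold over enumerate, characterised
theorem bfold (xs : List Int) (l : Int) : ∀ (s t c : Int),
    (PySem.List.enumerate xs s).foldl
      (fun (st : Int × Int) p =>
        if p.2 = 1 then (st.1 + 1, if l ≤ p.1 then st.2 + 1 else st.2) else st) (t, c)
      = (t + (cntOnes xs : Int), c + (cntOnes (xs.drop (l - s).toNat) : Int)) := by
  induction xs with
  | nil => intro s t c; simp [PySem.List.enumerate_nil, cntOnes]
  | cons x xs ih =>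
    intro s t c
    rw [PySem.List.enumerate_cons, List.foldl_cons]
    by_cases hx : x = 1
    · rw [if_pos hx]
      by_cases hs : l ≤ s
      · rw [if_pos hs, ih (s+1) (t+1) (c+1)]
        have h0 : (l - s).toNat = 0 := by omega
        have h1 : (l - (s+1)).toNat = 0 := by omega
        simp only [h0, h1, List.drop_zero, cntOnes, List.countP_cons, hx]
        simp; constructor <;> ring
      · rw [if_neg hs, ih (s+1) (t+1) c]
        have h0 : (l - s).toNat = (l - (s+1)).toNat + 1 := by omega
        simp only [h0, List.drop_succ_cons, cntOnes, List.countP_cons, hx]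
        simp; ring
    · rw [if_neg hx, ih (s+1) t c]
      have hdrop : (x :: xs).drop (l - s).toNat = if (l-s).toNat = 0 then x :: xs.drop (l-(s+1)).toNat else xs.drop (l-(s+1)).toNat := by
        by_cases h : (l - s).toNat = 0
        · have h1 : (l - (s+1)).toNat = 0 := by omega
          simp [h, h1]
        · have h0 : (l - s).toNat = (l - (s+1)).toNat + 1 := by omega
          simp [h0]
      rw [hdrop]
      split_ifs with h
      · simp [cntOnes, hx]
      · simp [cntOnes, hx]

-- window loop of A from a nonnegative index
theorem afold_window (xs : List Int) (a : Int) (ha : 0 ≤ a) (init : Int) :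
    (PySem.List.pyRange a (xs.length : Int) 1).foldl
      (fun c i => if PySem.List.pyGetD xs i 0 = 1 then c + 1 else c) init
      = init + (cntOnes (xs.drop a.toNat) : Int) := by
  rw [PySem.List.foldl_pyRange_pyGetD' xs 0 (fun c v => if v = 1 then c + 1 else c) init ha]
  rw [PySem.List.foldl_ite_add_one]
  rfl

-- prefix loop of A: indices 0..m-1
theorem afold_prefix (xs : List Int) (m : Nat) (hm : m ≤ xs.length) (init : Int) :
    (PySem.List.pyRange 0 (m : Int) 1).foldl
      (fun ans j => if PySem.List.pyGetD xs j 0 = 1 then ans + 1 else ans) init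
      = init + (cntOnes (xs.take m) : Int) := by
  have hlen : ((xs.take m).length : Int) = (m : Int) := by simp [List.length_take, hm]
  have hcongr : (PySem.List.pyRange 0 (m : Int) 1).foldl
      (fun ans j => if PySem.List.pyGetD xs j 0 = 1 then ans + 1 else ans) init
    = (PySem.List.pyRange 0 (m : Int) 1).foldl
      (fun ans j => if PySem.List.pyGetD (xs.take m) j 0 = 1 then ans + 1 else ans) init := by
    apply PySem.List.foldl_congr_mem
    intro acc j hj
    have hb := (PySem.List.mem_pyRange_one).1 hj
    have h0 : 0 ≤ j := hb.1
    have h1 : j < (m : Int) := hb.2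
    rw [PySem.List.pyGetD_of_nonneg xs 0 h0, PySem.List.pyGetD_of_nonneg (xs.take m) 0 h0]
    have : j.toNat < m := by omega
    simp [List.getD_eq_getElem?_getD, this]
  rw [hcongr]
  have := afold_window (xs.take m) 0 le_rfl init
  simp only [Int.toNat_zero, List.drop_zero] at this
  rw [← hlen]
  simpa using this

-- window loop of A over the negative indices -m..-1: the last m elements
theorem afold_neg (xs : List Int) (m : Nat) (hm : m ≤ xs.length) (init : Int) :
    (PySem.List.pyRange (-(m : Int)) 0 1).foldl
      (fun c i => if PySem.List.pyGetD xs i 0 = 1 then c + 1 else c) init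
      = init + (cntOnes (xs.drop (xs.length - m)) : Int) := by
  induction m generalizing init with
  | zero => simp [PySem.List.pyRange, cntOnes]
  | succ p ih =>
    rw [PySem.List.pyRange_one_cons (by push_cast; omega), List.foldl_cons]
    have hidx : xs.length - (p+1) < xs.length := by omega
    have hget : PySem.List.pyGetD xs (-(((p+1):Nat):Int)) 0 = xs[xs.length - (p+1)]'hidx := by
      rw [PySem.List.pyGetD, PySem.List.pyGet?_neg_natCast xs (p+1) (by omega) hm]
      rw [List.getElem?_eq_getElem hidx]
      rfl
    rw [show (-(((p+1):Nat):Int) + 1) = -((p:Nat):Int) by push_cast; ring]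
    have ihp := ih (by omega)
    have hdrop : xs.drop (xs.length - (p+1)) = xs[xs.length - (p+1)]'hidx :: xs.drop (xs.length - p) := by
      rw [List.drop_eq_getElem_cons hidx,
        show xs.length - (p+1) + 1 = xs.length - p from by omega]
    by_cases hone : xs[xs.length - (p+1)]'hidx = 1
    · rw [show (if PySem.List.pyGetD xs (-(((p+1):Nat):Int)) 0 = 1 then init + 1 else init) = init + 1 by rw [hget, if_pos hone]]
      rw [ihp (init + 1), hdrop]
      simp [cntOnes, hone]
      ring
    · rw [show (if PySem.List.pyGetD xs (-(((p+1):Nat):Int)) 0 = 1 then init + 1 else init) = init by rw [hget, if_neg hone]]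
      rw [ihp init, hdrop]
      simp [cntOnes, hone]

theorem cnt_split (xs : List Int) (m : Nat) :
    cntOnes xs = cntOnes (xs.take m) + cntOnes (xs.drop m) := by
  unfold cntOnes
  rw [← List.countP_append, List.take_append_drop]

-- ===== VERDICT (by name: the statement is the Claim_ definition above) =====
theorem ques_spec : Claim_unchanged_ques := by
  unfold Claim_unchanged_ques
  intro arr k _ hpre
  unfold Spec_ques
  intro hnd
  unfold ques ques_alt
  by_cases h1 : ((arr.length : Int)) = 1
  · simp [h1]
  · simp only [h1, if_false]
    rw [show (arr.length:Int) - (k-1) - 1 = (arr.length:Int) - k by ring]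
    rw [bfold arr ((arr.length:Int) - k) 0 0 0]
    have hk0 : 0 ≤ k := by
      rcases hpre with h | h
      · exact absurd (by exact_mod_cast h) h1
      · exact h.1
    by_cases hl : 0 ≤ (arr.length:Int) - k
    · -- window is inside the array
      obtain ⟨m, hm⟩ : ∃ m : Nat, (arr.length:Int) - k = (m:Int) :=
        ⟨((arr.length:Int) - k).toNat, (Int.toNat_of_nonneg hl).symm⟩
      have hmle : m ≤ arr.length := by omega
      rw [hm]
      rw [afold_window arr (m:Int) (by positivity) 0]
      rw [afold_prefix arr m hmle]
      rw [PySem.List.foldl_add _ (fun j => j) 0]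
      simp only [zero_add, List.map_id', Int.toNat_natCast, Int.sub_zero]
      rw [tri_sum, tri_cast]
      rw [cnt_split arr m]
      push_cast
      ring
    · -- k > len: window wraps; no ones in the wrapped tail since ¬ D_ques
      obtain ⟨m, hmeq⟩ : ∃ m : Nat, (arr.length:Int) - k = -(m:Int) :=
        ⟨(k - (arr.length:Int)).toNat, by omega⟩
      have hkgt : (arr.length:Int) < k := by omega
      have hmle : m ≤ arr.length := by
        rcases hpre with h | h
        · exact absurd (by exact_mod_cast h) h1
        · omega
      have hzero : cntOnes (arr.drop (arr.length - m)) = 0 := by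
        have hnot : (1:Int) ∉ arr.drop (arr.length - (k - (arr.length:Int)).toNat) := by
          intro hmem
          exact hnd ⟨by exact_mod_cast h1 ∘ (by exact_mod_cast ·), hkgt, hmem⟩
        have hmm : (k - (arr.length:Int)).toNat = m := by omega
        rw [hmm] at hnot
        unfold cntOnes
        rw [List.countP_eq_zero]
        intro v hv
        simp only [decide_eq_true_eq]
        intro hv1
        exact hnot (hv1 ▸ hv)
      rw [hmeq]
      rw [PySem.List.pyRange_one_append (-(m:Int)) 0 (arr.length:Int) (by omega) (by positivity),
        List.foldl_append]
      rw [afold_neg arr m hmle 0, hzero]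
      rw [afold_window arr 0 le_rfl]
      simp only [Int.toNat_zero, List.drop_zero, zero_add, Nat.cast_zero, add_zero]
      rw [PySem.List.pyRange_one_eq_nil (show -(m:Int) ≤ 0 by omega)]
      rw [List.foldl_nil]
      rw [PySem.List.foldl_add _ (fun j => j) 0]
      simp only [zero_add, List.map_id']
      rw [tri_sum]
      have h0 : (-(m:Int) - 0).toNat = 0 := by omega
      rw [h0]
      simp
theorem ques_changed : Claim_changed_ques := by
  unfold Claim_changed_ques; decide
theorem ques_tight : Claim_exact_ques := by
  unfold Claim_exact_ques
  intro arr k _ hpre hd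
  obtain ⟨hne, hkgt, hmem⟩ := hd
  have h1 : ¬ ((arr.length : Int)) = 1 := by exact_mod_cast hne
  have hk0 : 0 ≤ k := by
    rcases hpre with h | h
    · exact absurd h hne
    · exact h.1
  obtain ⟨m, hmeq⟩ : ∃ m : Nat, (arr.length:Int) - k = -(m:Int) :=
    ⟨(k - (arr.length:Int)).toNat, by omega⟩
  have hmle : m ≤ arr.length := by
    rcases hpre with h | h
    · exact absurd h hne
    · omega
  have hmm : (k - (arr.length:Int)).toNat = m := by omega
  rw [hmm] at hmem
  have hx : 0 < cntOnes (arr.drop (arr.length - m)) := by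
    unfold cntOnes
    rw [List.countP_pos_iff]
    exact ⟨1, hmem, by simp⟩
  unfold ques ques_alt
  simp only [h1, if_false]
  rw [show (arr.length:Int) - (k-1) - 1 = (arr.length:Int) - k by ring]
  rw [bfold arr ((arr.length:Int) - k) 0 0 0]
  rw [hmeq]
  rw [PySem.List.pyRange_one_append (-(m:Int)) 0 (arr.length:Int) (by omega) (by positivity),
    List.foldl_append]
  rw [afold_neg arr m hmle 0]
  rw [afold_window arr 0 le_rfl]
  simp only [Int.toNat_zero, List.drop_zero, zero_add]
  rw [PySem.List.pyRange_one_eq_nil (show -(m:Int) ≤ 0 by omega), List.foldl_nil]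
  rw [PySem.List.foldl_add _ (fun j => j) 0]
  simp only [zero_add, List.map_id']
  have hcast : (cntOnes (arr.drop (arr.length - m)) : Int) + (cntOnes arr : Int)
      = ((cntOnes (arr.drop (arr.length - m)) + cntOnes arr : Nat) : Int) := by push_cast; ring
  rw [hcast, tri_sum, tri_cast]
  have h0 : (-(m:Int) - 0).toNat = 0 := by omega
  rw [h0]
  simp only [List.drop_zero]
  rw [tri_cast]
  intro heq
  have hlt : cntOnes arr * (cntOnes arr + 1) / 2
      < (cntOnes (arr.drop (arr.length - m)) + cntOnes arr) * ((cntOnes (arr.drop (arr.length - m)) + cntOnes arr) + 1) / 2 :=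
    triNat_lt (by omega)
  omega
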